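-- pv_equiv track=rewrite | github.com/tuwi-0808374/python-introductie | Opdracht_les_7/studenten.py | is_student_excellent
-- ===== SOURCE A (Python) =====
-- def is_student_excellent(student):
--     excellent = True
--     for result in student['resultaten']:
--         if student['resultaten'][result] == "uitmuntend":
--             excellent = True
--             break
--         if student['resultaten'][result] == "voldoende" or student['resultaten'][result] == "onvoldoende":
--             excellent = False
--     return excellent
-- ===== SOURCE B (Python) =====
-- def is_student_excellent(student):
--     vals = student['resultaten'].values()
--     if 'uitmuntend' in vals:
--         return True
--     if any(v in ('voldoende', 'onvoldoende') for v in vals):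
--         return False
--     return True
-- ===== Notes on version B (the rewrite author's own statement) =====
-- stated objective: simpler
-- what changed: A's flag-and-break loop over keys with repeated dict lookups is replaced by priority-ordered existence tests over the values: 'uitmuntend' anywhere wins, otherwise any '(on)voldoende' loses, otherwise True (the result is order-independent).
import Mathlib
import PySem

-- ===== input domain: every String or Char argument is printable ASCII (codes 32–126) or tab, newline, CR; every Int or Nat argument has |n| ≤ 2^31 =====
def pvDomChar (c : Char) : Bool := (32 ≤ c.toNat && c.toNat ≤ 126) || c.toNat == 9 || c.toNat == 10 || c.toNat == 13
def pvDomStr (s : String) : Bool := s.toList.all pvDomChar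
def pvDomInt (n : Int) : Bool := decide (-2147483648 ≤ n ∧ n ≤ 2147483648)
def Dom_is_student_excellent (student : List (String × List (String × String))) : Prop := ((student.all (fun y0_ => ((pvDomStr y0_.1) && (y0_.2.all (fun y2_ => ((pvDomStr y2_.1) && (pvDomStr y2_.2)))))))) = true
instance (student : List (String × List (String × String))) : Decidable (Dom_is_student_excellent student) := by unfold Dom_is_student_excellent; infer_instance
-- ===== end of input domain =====

-- B changes only the decomposition (same O(n) cost): priority-ordered existence tests on the
-- values instead of A's flag-and-break loop over the keys.

-- ===== PORT A =====
-- first-match association-list lookup (Python dict lookup under the task's type convention);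
-- the "" / [] defaults are never reached inside Pre_ (key present, keys distinct)
def getS (d : List (String × String)) (k : String) : String :=
  match d with
  | [] => ""
  | (k', v) :: rest => if k' == k then v else getS rest k

def getR (s : List (String × List (String × String))) (k : String) : List (String × String) :=
  match s with
  | [] => []
  | (k', v) :: rest => if k' == k then v else getR rest k

-- A's for-loop over the keys: break-with-True on "uitmuntend", flag False on "(on)voldoende"
def aLoop (d : List (String × String)) : List String → Bool → Bool
  | [], exc => exc
  | k :: ks, exc =>
    if getS d k == "uitmuntend" then true
    else aLoop d ks (if getS d k == "voldoende" || getS d k == "onvoldoende" then false else exc)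

def is_student_excellent (student : List (String × List (String × String))) : Bool :=
  let d := getR student "resultaten"
  aLoop d (d.map Prod.fst) true

-- ===== PORT B =====
def is_student_excellent_alt (student : List (String × List (String × String))) : Bool :=
  let vals := (getR student "resultaten").map Prod.snd
  if vals.contains "uitmuntend" then true
  else if vals.any (fun v => v == "voldoende" || v == "onvoldoende") then false
  else true

-- ===== PRECONDITION & SPEC =====
-- Pre_ requires the 'resultaten' key (A and B both raise KeyError without it) and distinct keys at
-- both levels: a Python dict cannot hold duplicate keys, so association lists with duplicates do not
-- represent any Python input and lookup on them would be ambiguous.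
def Pre_is_student_excellent (student : List (String × List (String × String))) : Prop :=
  "resultaten" ∈ student.map Prod.fst ∧ (student.map Prod.fst).Nodup ∧
    ∀ p ∈ student, (p.2.map Prod.fst).Nodup
instance (student : List (String × List (String × String))) : Decidable (Pre_is_student_excellent student) := by
  unfold Pre_is_student_excellent; infer_instance

def pvWitness_is_student_excellent : (List (String × List (String × String))) :=
  [("naam", []), ("resultaten", [("wiskunde", "voldoende"), ("taal", "uitmuntend")])]

def Spec_is_student_excellent (student : List (String × List (String × String))) (out : Bool) : Prop := out = is_student_excellent_alt student
instance (student : List (String × List (String × String))) (out : Bool) : Decidable (Spec_is_student_excellent student out) := by unfold Spec_is_student_excellent; infer_instance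

-- ===== CLAIM (what is proved, stated in full; the proofs are below) =====
def Claim_equal_is_student_excellent : Prop := ∀ (student : List (String × List (String × String))), Dom_is_student_excellent student → Pre_is_student_excellent student → Spec_is_student_excellent student (is_student_excellent student)

-- ===== LEMMAS AND PROOFS =====

-- A's loop computes priority-ordered existence tests over the keys, whatever the flag's value
theorem aLoop_spec (d : List (String × String)) (ks : List String) (exc : Bool) :
    aLoop d ks exc =
      (if ks.any (fun k => getS d k == "uitmuntend") then true
       else if ks.any (fun k => getS d k == "voldoende" || getS d k == "onvoldoende") then false
       else exc) := by
  induction ks generalizing exc with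
  | nil => simp [aLoop]
  | cons k ks ih =>
    simp only [aLoop, List.any_cons]
    by_cases h1 : getS d k == "uitmuntend"
    · simp [h1]
    · by_cases h2 : (getS d k == "voldoende" || getS d k == "onvoldoende") = true
      · simp [h1, h2, ih]
      · simp [h1, h2, ih]

-- under a fresh head key, looking up through the extended dict is looking up the tail
theorem any_getS_cons (k v : String) (rest : List (String × String)) (p : String → Bool)
    (ks : List String) (hk : k ∉ ks) :
    (ks.any fun k' => p (if (k == k') = true then v else getS rest k')) =
      (ks.any fun k' => p (getS rest k')) := by
  induction ks with
  | nil => rfl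
  | cons x xs ih =>
    simp only [List.mem_cons, not_or] at hk
    have hne : (k == x) = false := by simp [hk.1]
    rw [List.any_cons, List.any_cons, hne, ih hk.2]
    simp

-- with distinct keys, scanning the keys and looking each up is scanning the values
theorem any_keys_eq_any_values (d : List (String × String)) (p : String → Bool)
    (hd : (d.map Prod.fst).Nodup) :
    ((d.map Prod.fst).any (fun k => p (getS d k))) = ((d.map Prod.snd).any p) := by
  induction d with
  | nil => rfl
  | cons kv rest ih =>
    obtain ⟨k, v⟩ := kv
    simp only [List.map_cons, List.nodup_cons] at hd
    simp only [List.map_cons, List.any_cons, getS, BEq.rfl, if_pos]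
    rw [any_getS_cons k v rest p _ hd.1, ih hd.2]

-- keys of the looked-up inner dict are distinct when every inner dict has distinct keys
theorem getR_nodup (s : List (String × List (String × String)))
    (h : ∀ p ∈ s, (p.2.map Prod.fst).Nodup) :
    (((getR s "resultaten").map Prod.fst)).Nodup := by
  induction s with
  | nil => simp [getR]
  | cons kv rest ih =>
    obtain ⟨k, v⟩ := kv
    by_cases hk : (k == "resultaten") = true
    · simpa [getR, hk] using h (k, v) (by simp)
    · simpa [getR, hk] using ih (fun p hp => h p (by simp [hp]))

-- ===== VERDICT (by name: the statement is the Claim_ definition above) =====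
theorem is_student_excellent_spec : Claim_equal_is_student_excellent := by
  intro student _ hpre
  obtain ⟨-, -, hinner⟩ := hpre
  unfold Spec_is_student_excellent is_student_excellent is_student_excellent_alt
  have hdN := getR_nodup student hinner
  rw [aLoop_spec,
      any_keys_eq_any_values _ (fun s => s == "uitmuntend") hdN,
      any_keys_eq_any_values _ (fun s => s == "voldoende" || s == "onvoldoende") hdN]
  congr 1
  rw [Bool.eq_iff_iff]
  simp [List.any_eq_true]
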